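-- pv_equiv track=rewrite | github.com/beyzzk/hamming-sec-ded-code | main.py | label_bit_positions
-- ===== SOURCE A (Python) =====
-- def is_power_of_two(n):
--     return n and (n & (n - 1)) == 0
--
-- def label_bit_positions(code_bits):
--     n = len(code_bits)
--     labels = [''] * n
--     labels[0] = "P"  #parity bit
--     d_count = 1
--     for i in range(n-1, 0, -1):
--         pos = n - i
--         if is_power_of_two(pos):
--             labels[i] = f"C{pos}"
--         else:
--             labels[i] = f"D{d_count}"
--             d_count += 1
--     return labels
-- ===== SOURCE B (Python) =====
-- def _label(pos):
--     # closed form: the D-index of a non-power position pos equals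
--     # the number of non-powers-of-two in [1, pos] = pos - pos.bit_length()
--     if pos & (pos - 1) == 0:
--         return f"C{pos}"
--     return f"D{pos - pos.bit_length()}"
--
-- def label_bit_positions(code_bits):
--     n = len(code_bits)
--     return ["P" if i == 0 else _label(n - i) for i in range(n)]
-- ===== Notes on version B (the rewrite author's own statement) =====
-- stated objective: simpler
-- what changed: Replaced the reverse index-assignment loop with its mutable d_count accumulator by a single forward comprehension that computes each data label by the closed form pos - pos.bit_length() (the number of non-powers-of-two in [1, pos]).
import Mathlib
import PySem

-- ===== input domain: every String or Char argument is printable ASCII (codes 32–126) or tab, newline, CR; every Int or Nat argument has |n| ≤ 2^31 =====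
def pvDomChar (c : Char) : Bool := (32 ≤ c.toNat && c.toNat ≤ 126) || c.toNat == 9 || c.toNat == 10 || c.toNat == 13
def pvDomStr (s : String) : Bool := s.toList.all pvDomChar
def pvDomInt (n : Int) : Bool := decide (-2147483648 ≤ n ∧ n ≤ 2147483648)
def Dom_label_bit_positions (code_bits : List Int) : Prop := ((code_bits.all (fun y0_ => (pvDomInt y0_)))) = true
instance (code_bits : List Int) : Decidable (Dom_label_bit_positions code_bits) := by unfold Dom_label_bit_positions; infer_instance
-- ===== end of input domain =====

-- B replaces A's reverse loop with a stateful d_count counter by a single forward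
-- comprehension whose data index is the closed form pos - pos.bit_length() (objective: simpler).

-- ===== PORT A =====
def is_power_of_two (n : Int) : Bool := n != 0 && PySem.Int.band n (n - 1) == 0

def label_bit_positions (code_bits : List Int) : List String :=
  let n : Int := (code_bits.length : Int)
  let labels : List String := List.replicate code_bits.length ""
  let labels := PySem.List.pySetD labels 0 "P"   -- the assignment of "P" at index 0: IndexError on an empty list (excluded by Pre_)
  let st := (PySem.List.pyRange (n - 1) 0 (-1)).foldl
    (fun (st : List String × Int) (i : Int) =>
      let pos := n - i
      if is_power_of_two pos then
        (PySem.List.pySetD st.1 i ("C" ++ PySem.Int.toStr pos), st.2)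
      else
        (PySem.List.pySetD st.1 i ("D" ++ PySem.Int.toStr st.2), st.2 + 1))
    (labels, 1)
  st.1

-- ===== PORT B =====
-- PySem.Int.bitLength is pos.bit_length()
def pvLabel (pos : Int) : String :=
  if PySem.Int.band pos (pos - 1) == 0 then "C" ++ PySem.Int.toStr pos
  else "D" ++ PySem.Int.toStr (pos - (PySem.Int.bitLength pos : Int))

def label_bit_positions_alt (code_bits : List Int) : List String :=
  let n : Int := (code_bits.length : Int)
  (PySem.List.pyRange 0 n 1).map (fun i => if i == 0 then "P" else pvLabel (n - i))

-- ===== PRECONDITION & SPEC =====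
-- Pre_ excludes only the empty list, on which A raises IndexError at its first index assignment.
def Pre_label_bit_positions (code_bits : List Int) : Prop := code_bits ≠ []
instance (code_bits : List Int) : Decidable (Pre_label_bit_positions code_bits) := by unfold Pre_label_bit_positions; infer_instance
def pvWitness_label_bit_positions : List Int := [1, 0, 1, 1, 0, 0, 1]

def Spec_label_bit_positions (code_bits : List Int) (out : List String) : Prop := out = label_bit_positions_alt code_bits
instance (code_bits : List Int) (out : List String) : Decidable (Spec_label_bit_positions code_bits out) := by unfold Spec_label_bit_positions; infer_instance

-- ===== CLAIM (what is proved, stated in full; the proofs are below) =====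
def Claim_equal_label_bit_positions : Prop := ∀ (code_bits : List Int), Dom_label_bit_positions code_bits → Pre_label_bit_positions code_bits → Spec_label_bit_positions code_bits (label_bit_positions code_bits)

-- ===== LEMMAS AND PROOFS =====

-- bit_length of a Nat, as a Nat-valued helper for the proofs
def pvBl (m : Nat) : Nat := PySem.Int.bitLength (m : Int)

lemma pv_land_odd (t : Nat) : (2*t+1) &&& (2*t) = 2*t := by
  apply Nat.eq_of_testBit_eq
  intro i
  rw [Nat.testBit_land]
  cases i with
  | zero => simp [Nat.testBit_zero]
  | succ i =>
    have h1 : (2*t+1)/2 = t := by omega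
    have h2 : (2*t)/2 = t := by omega
    simp [Nat.testBit_add_one, h1, h2]

lemma pv_land_even (t : Nat) : (2*t+2) &&& (2*t+1) = 2*((t+1) &&& t) := by
  apply Nat.eq_of_testBit_eq
  intro i
  rw [Nat.testBit_land]
  cases i with
  | zero => simp [Nat.testBit_zero]
  | succ i =>
    have h1 : (2*t+2)/2 = t+1 := by omega
    have h2 : (2*t+1)/2 = t := by omega
    have h3 : (2*((t+1) &&& t))/2 = (t+1) &&& t := by omega
    simp [Nat.testBit_add_one, h1, h2, h3]

-- the one bit-twiddling fact: bit_length grows by 1 exactly at powers of two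
lemma pv_bl_step (m : Nat) : pvBl (m+1) = pvBl m + (if (m+1) &&& m = 0 then 1 else 0) := by
  induction m using Nat.strong_induction_on with
  | _ m ih =>
    rcases Nat.even_or_odd m with he | ho
    · obtain ⟨t, ht⟩ := he
      have hm : m = 2 * t := by omega
      subst hm
      rcases Nat.eq_zero_or_pos t with rfl | hpos
      · decide
      · have hne : ¬((2*t+1) &&& (2*t) = 0) := by rw [pv_land_odd]; omega
        rw [if_neg hne]
        have e1 : pvBl (2*t+1) = pvBl t + 1 := by
          unfold pvBl
          rw [PySem.Int.bitLength_natCast (m := 2*t+1) (by omega)]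
          have : (2*t+1)/2 = t := by omega
          rw [this]
        have e2 : pvBl (2*t) = pvBl t + 1 := by
          unfold pvBl
          rw [PySem.Int.bitLength_natCast (m := 2*t) (by omega)]
          have : (2*t)/2 = t := by omega
          rw [this]
        omega
    · obtain ⟨t, ht⟩ := ho
      subst ht
      have e1 : pvBl (2*t+1+1) = pvBl (t+1) + 1 := by
        unfold pvBl
        rw [PySem.Int.bitLength_natCast (m := 2*t+1+1) (by omega)]
        have : (2*t+1+1)/2 = t+1 := by omega
        rw [this]
      have e2 : pvBl (2*t+1) = pvBl t + 1 := by
        unfold pvBl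
        rw [PySem.Int.bitLength_natCast (m := 2*t+1) (by omega)]
        have : (2*t+1)/2 = t := by omega
        rw [this]
      have ihh := ih t (by omega)
      have hl : (2*t+1+1) &&& (2*t+1) = 2*((t+1) &&& t) := by
        have := pv_land_even t
        omega
      by_cases hc : (t+1) &&& t = 0
      · rw [if_pos (by omega)]
        rw [if_pos hc] at ihh
        omega
      · rw [if_neg (by omega)]
        rw [if_neg hc] at ihh
        omega

lemma pv_band_cast (m : Nat) : PySem.Int.band ((m:Int)+1) ((m:Int)+1-1) = (((m+1) &&& m : Nat) : Int) := by
  have h1 : ((m:Int)+1) = ((m+1 : Nat) : Int) := by push_cast; ring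
  have h2 : ((m+1 : Nat) : Int) - 1 = ((m : Nat) : Int) := by push_cast; ring
  rw [h1, h2, PySem.Int.band_natCast]

lemma pv_foldA (N : Int) : ∀ (m : Nat) (ls : List String),
    ((List.range m).map (fun (k : Nat) => N - 1 - (k : Int))).foldl
      (fun (st : List String × Int) (i : Int) =>
        let pos := N - i
        if is_power_of_two pos then
          (PySem.List.pySetD st.1 i ("C" ++ PySem.Int.toStr pos), st.2)
        else
          (PySem.List.pySetD st.1 i ("D" ++ PySem.Int.toStr st.2), st.2 + 1))
      (ls, 1)
    = ((List.range m).foldl (fun l (k : Nat) => PySem.List.pySetD l (N - 1 - (k : Int)) (pvLabel ((k : Int) + 1))) ls,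
       1 + (m : Int) - (pvBl m : Int)) := by
  intro m ls
  induction m with
  | zero => simp [pvBl]
  | succ m ih =>
    rw [List.range_succ, List.map_append, List.foldl_append, List.foldl_append, ih]
    simp only [List.map_cons, List.map_nil, List.foldl_cons, List.foldl_nil]
    have hpos : N - (N - 1 - (m:Int)) = (m:Int) + 1 := by ring
    have hstep := pv_bl_step m
    by_cases h : (m+1) &&& m = 0
    · have hpow : (((m+1) &&& m : Nat) : Int) = 0 := by rw [h]; rfl
      have hip : is_power_of_two ((m:Int) + 1) = true := by
        unfold is_power_of_two
        rw [pv_band_cast m, hpow]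
        simp
        omega
      rw [if_pos h] at hstep
      simp only [hpos, hip, if_true, Prod.mk.injEq]
      refine ⟨?_, ?_⟩
      · congr 1
        unfold pvLabel
        rw [pv_band_cast m, hpow]
        simp
      · push_cast
        omega
    · have hband : (((m+1) &&& m : Nat) : Int) ≠ 0 := by exact_mod_cast h
      have hip : is_power_of_two ((m:Int) + 1) = false := by
        unfold is_power_of_two
        rw [pv_band_cast m]
        simp
        intro _
        exact h
      rw [if_neg h] at hstep
      simp only [hpos, hip, Bool.false_eq_true, if_false, Prod.mk.injEq]
      refine ⟨?_, ?_⟩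
      · congr 1
        unfold pvLabel
        rw [pv_band_cast m]
        rw [if_neg (by simp; exact h)]
        congr 1
        have hc : ((m:Int)+1) = ((m+1:Nat):Int) := by push_cast; ring
        rw [hc]
        have hbl : PySem.Int.bitLength (((m+1):Nat):Int) = pvBl m := by
          have h2 := hstep
          unfold pvBl at h2 ⊢
          omega
        rw [hbl]
        push_cast
        congr 1
        omega
      · push_cast
        omega

lemma pv_len_fold (n : Nat) : ∀ (m : Nat) (ls : List String),
    ((List.range m).foldl (fun l (k : Nat) => PySem.List.pySetD l ((n:Int) - 1 - (k : Int)) (pvLabel ((k : Int) + 1))) ls).length = ls.length := by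
  intro m ls
  induction m with
  | zero => rfl
  | succ m ih =>
    rw [List.range_succ, List.foldl_append, List.foldl_cons, List.foldl_nil,
      PySem.List.length_pySetD, ih]

lemma pv_setsA (n : Nat) : ∀ (m : Nat) (ls : List String), ls.length = n → m ≤ n - 1 →
    ∀ (j : Nat),
    ((List.range m).foldl (fun l (k : Nat) => PySem.List.pySetD l ((n : Int) - 1 - (k : Int)) (pvLabel ((k : Int) + 1))) ls)[j]?
    = if n - m ≤ j ∧ j < n then some (pvLabel ((n : Int) - (j : Int))) else ls[j]? := by
  intro m ls hlen hm j
  induction m with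
  | zero =>
    rw [if_neg (by omega)]
    rfl
  | succ m ih =>
    have hm' : m ≤ n - 1 := by omega
    have hn2 : 2 ≤ n := by omega
    rw [List.range_succ, List.foldl_append, List.foldl_cons, List.foldl_nil]
    have hidx : ((n:Int) - 1 - (m:Int)) = ((n - 1 - m : Nat) : Int) := by omega
    rw [hidx, PySem.List.pySetD_natCast, List.getElem?_set, pv_len_fold n m ls, hlen]
    by_cases hj : n - 1 - m = j
    · rw [if_pos hj]
      rw [if_pos (by omega)]
      rw [if_pos (by omega)]
      have he : ((m:Int) + 1) = (n : Int) - (j : Int) := by omega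
      rw [he]
    · rw [if_neg hj, ih hm']
      by_cases hin : n - m ≤ j ∧ j < n
      · rw [if_pos hin, if_pos (by omega)]
      · rw [if_neg hin, if_neg (by omega)]

-- ===== VERDICT (by name: the statement is the Claim_ definition above) =====
theorem label_bit_positions_spec : Claim_equal_label_bit_positions := by
  intro cb _ hpre
  unfold Spec_label_bit_positions
  have hn : 1 ≤ cb.length := by
    cases cb with
    | nil => exact absurd rfl hpre
    | cons a l => simp
  set n : Nat := cb.length with hndef
  apply List.ext_getElem?
  intro j
  -- left side
  have hL : (label_bit_positions cb)[j]? =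
      if n - (n-1) ≤ j ∧ j < n then some (pvLabel ((n : Int) - (j : Int)))
      else ((List.replicate n "").set 0 "P")[j]? := by
    show ((PySem.List.pyRange ((n:Int) - 1) 0 (-1)).foldl _ (PySem.List.pySetD (List.replicate n "") 0 "P", 1)).1[j]? = _
    rw [PySem.List.pyRange_neg_one]
    have ht : (((n:Int) - 1) - 0).toNat = n - 1 := by omega
    rw [ht]
    have h0 : PySem.List.pySetD (List.replicate n "") (0:Int) "P" = (List.replicate n "").set 0 "P" := by
      have : (0:Int) = ((0:Nat):Int) := rfl
      rw [this, PySem.List.pySetD_natCast]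
    rw [h0, pv_foldA ((n:Int)) (n-1)]
    exact pv_setsA n (n-1) _ (by simp) (by omega) j
  have hR : (label_bit_positions_alt cb)[j]? =
      if j < n then some (if ((0:Int) + (j:Int)) == 0 then "P" else pvLabel ((n:Int) - ((0:Int) + (j:Int)))) else none := by
    show ((PySem.List.pyRange 0 (n:Int) 1).map _)[j]? = _
    rw [PySem.List.pyRange_one]
    have ht : ((n:Int) - 0).toNat = n := by omega
    rw [ht, List.map_map, List.getElem?_map]
    by_cases hj : j < n
    · rw [List.getElem?_range hj, if_pos hj]
      rfl
    · rw [List.getElem?_eq_none (by simpa using by omega : (List.range n).length ≤ j), if_neg hj]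
      rfl
  rw [hL, hR]
  by_cases hj : j < n
  · rw [if_pos hj]
    by_cases hj0 : j = 0
    · subst hj0
      rw [if_neg (by omega)]
      have : (((0:Int) + ((0:Nat):Int)) == 0) = true := by simp
      rw [this, if_pos rfl]
      rw [List.getElem?_set]
      rw [if_pos rfl, if_pos (by simp; omega)]
    · rw [if_pos (by omega)]
      have : (((0:Int) + ((j:Nat):Int)) == 0) = false := by
        simp; omega
      rw [this]
      simp only [Bool.false_eq_true, if_false]
      congr 2
      omega
  · rw [if_neg (by omega), if_neg hj]
    rw [List.getElem?_set, if_neg (by omega)]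
    exact List.getElem?_eq_none (by simp; omega)
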